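-- pv_equiv track=rewrite | github.com/guchengwei/nemotron-finance-demo | backend/routers/report.py | _top_demographic_signal
-- ===== SOURCE A (Python) =====
-- def _top_demographic_signal(demographic_breakdown: dict) -> str:
--     signals = []
--     for label, values in demographic_breakdown.items():
--         if not isinstance(values, dict) or not values:
--             continue
--         best_group = max(values.items(), key=lambda item: item[1])
--         signals.append((best_group[1], label, best_group[0]))
--     if not signals:
--         return ""
--     _, label, group = max(signals, key=lambda item: item[0])
--     labels = {
--         "by_age": "年齢層",
--         "by_sex": "性別",
--         "by_financial_literacy": "金融リテラシー",
--     }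
--     return f"{labels.get(label, label)}では{group}の反応が比較的強めです。"
-- ===== SOURCE B (Python) =====
-- def _top_demographic_signal(demographic_breakdown: dict) -> str:
--     best = None  # running (value, label, group)
--     for label, values in demographic_breakdown.items():
--         if not isinstance(values, dict):
--             continue
--         for group, value in values.items():
--             if best is None or value > best[0]:
--                 best = (value, label, group)
--     if best is None:
--         return ""
--     _, label, group = best
--     labels = {
--         "by_age": "年齢層",
--         "by_sex": "性別",
--         "by_financial_literacy": "金融リテラシー",
--     }
--     return f"{labels.get(label, label)}では{group}の反応が比較的強めです。"
-- ===== Notes on version B (the rewrite author's own statement) =====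
-- stated objective: simpler
-- what changed: Replaces the intermediate per-label signals list and the two-level max (inner max per label, outer max over signals) by a single pass over all (label, group, value) entries maintaining one running best triple with strict >; no intermediate list or key-lambda max calls.
import Mathlib
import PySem

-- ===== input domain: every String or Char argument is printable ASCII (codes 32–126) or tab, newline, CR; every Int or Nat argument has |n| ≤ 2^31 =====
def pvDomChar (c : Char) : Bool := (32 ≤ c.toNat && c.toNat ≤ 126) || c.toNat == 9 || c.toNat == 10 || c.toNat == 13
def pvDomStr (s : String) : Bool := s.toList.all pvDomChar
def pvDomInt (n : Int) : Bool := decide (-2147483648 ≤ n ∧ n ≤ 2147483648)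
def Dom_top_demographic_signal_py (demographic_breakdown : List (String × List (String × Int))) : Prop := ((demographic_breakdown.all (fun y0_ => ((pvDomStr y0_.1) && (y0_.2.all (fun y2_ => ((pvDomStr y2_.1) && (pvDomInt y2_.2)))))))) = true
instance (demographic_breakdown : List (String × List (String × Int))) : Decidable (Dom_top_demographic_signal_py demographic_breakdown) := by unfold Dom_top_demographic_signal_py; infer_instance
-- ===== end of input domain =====

-- B replaces A's intermediate signals list and two-level max by a single running-best pass (simpler decomposition, same values).


-- ===== PORT A =====
-- labels dict shared by both ports' final formatting (identical literal in both Pythons)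
def pvLabels : PySem.Dict String String :=
  PySem.Dict.ofList [("by_age", "年齢層"), ("by_sex", "性別"), ("by_financial_literacy", "金融リテラシー")]

-- Python: max(values.items(), key=lambda item: item[1])  (first maximum wins, strict >)
def pvInnerMax (h : String × Int) (t : List (String × Int)) : String × Int :=
  t.foldl (fun b x => if x.2 > b.2 then x else b) h

def top_demographic_signal_py (demographic_breakdown : List (String × List (String × Int))) : String :=
  -- isinstance(values, dict) is always true under the type convention
  let signals : List (Int × String × String) :=
    demographic_breakdown.foldl (fun acc lv =>
      match lv.2 with
      | [] => acc
      | h :: t =>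
        let best_group := pvInnerMax h t
        acc ++ [(best_group.2, lv.1, best_group.1)]) []
  match signals with
  | [] => ""
  | s :: ss =>
    -- max(signals, key=lambda item: item[0])
    let m := ss.foldl (fun b x => if x.1 > b.1 then x else b) s
    (pvLabels.getD m.2.1 m.2.1) ++ "では" ++ m.2.2 ++ "の反応が比較的強めです。"

-- ===== PORT B =====
def pvStepB (label : String) (b : Option (Int × String × String)) (gv : String × Int) :
    Option (Int × String × String) :=
  match b with
  | none => some (gv.2, label, gv.1)
  | some s => if gv.2 > s.1 then some (gv.2, label, gv.1) else some s

def top_demographic_signal_py_alt (demographic_breakdown : List (String × List (String × Int))) : String :=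
  let best : Option (Int × String × String) :=
    demographic_breakdown.foldl (fun b lv => lv.2.foldl (pvStepB lv.1) b) none
  match best with
  | none => ""
  | some (_, label, group) =>
    (pvLabels.getD label label) ++ "では" ++ group ++ "の反応が比較的強めです。"

-- ===== PRECONDITION & SPEC =====
def Spec_top_demographic_signal_py (demographic_breakdown : List (String × List (String × Int))) (out : String) : Prop := out = top_demographic_signal_py_alt demographic_breakdown
instance (demographic_breakdown : List (String × List (String × Int))) (out : String) : Decidable (Spec_top_demographic_signal_py demographic_breakdown out) := by unfold Spec_top_demographic_signal_py; infer_instance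

-- ===== CLAIM (what is proved, stated in full; the proofs are below) =====
def Claim_equal_top_demographic_signal_py : Prop := ∀ (demographic_breakdown : List (String × List (String × Int))), Dom_top_demographic_signal_py demographic_breakdown → Spec_top_demographic_signal_py demographic_breakdown (top_demographic_signal_py demographic_breakdown)

-- ===== LEMMAS AND PROOFS =====

-- abbreviations for the proof
def pvStepA (b x : String × Int) : String × Int := if x.2 > b.2 then x else b
def pvOptStep (b : Option (Int × String × String)) (x : Int × String × String) :
    Option (Int × String × String) :=
  match b with
  | none => some x
  | some s => if x.1 > s.1 then some x else some s

-- the seed value never decreases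
theorem pvM (t : List (String × Int)) (h : String × Int) : h.2 ≤ (t.foldl pvStepA h).2 := by
  induction t generalizing h with
  | nil => exact le_refl _
  | cons x t ih =>
    simp only [List.foldl_cons]
    refine le_trans ?_ (ih (pvStepA h x))
    unfold pvStepA; split <;> omega

-- comparing folds from two seeds, the smaller seed dominated
theorem pvN (t : List (String × Int)) (a b : String × Int) (hba : b.2 ≤ a.2) :
    t.foldl pvStepA a = if (t.foldl pvStepA b).2 > a.2 then t.foldl pvStepA b else a := by
  induction t generalizing a b with
  | nil => simp; omega
  | cons x t ih =>
    simp only [List.foldl_cons]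
    by_cases hx : x.2 > a.2
    · have hsa : pvStepA a x = x := by unfold pvStepA; simp [hx]
      have hsb : pvStepA b x = x := by unfold pvStepA; simp [show x.2 > b.2 by omega]
      rw [hsa, hsb]
      have := pvM t x
      rw [if_pos (by omega)]
    · have hsa : pvStepA a x = a := by unfold pvStepA; simp [hx]
      rw [hsa]
      by_cases hxb : x.2 > b.2
      · have hsb : pvStepA b x = x := by unfold pvStepA; simp [hxb]
        rw [hsb]; exact ih a x (by omega)
      · have hsb : pvStepA b x = b := by unfold pvStepA; simp [hxb]
        rw [hsb]; exact ih a b hba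
-- main inner lemma: B's fold over a label's entries, starting from a known best s
theorem pvL (label : String) (t : List (String × Int)) (h : String × Int)
    (s : Int × String × String) :
    t.foldl (pvStepB label) (pvStepB label (some s) h) =
      (if (t.foldl pvStepA h).2 > s.1
        then some ((t.foldl pvStepA h).2, label, (t.foldl pvStepA h).1)
        else some s) := by
  induction t generalizing h s with
  | nil =>
    simp only [List.foldl_nil]
    unfold pvStepB
    by_cases hc : h.2 > s.1 <;> simp [hc]
  | cons x t ih =>
    simp only [List.foldl_cons]
    have hstep : pvStepB label (some s) h =
        some (if h.2 > s.1 then (h.2, label, h.1) else s) := by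
      unfold pvStepB
      by_cases hc : h.2 > s.1 <;> simp [hc]
    rw [hstep]
    have key := ih x (if h.2 > s.1 then (h.2, label, h.1) else s)
    rw [key]
    by_cases hxh : x.2 > h.2
    · have hsa : pvStepA h x = x := by unfold pvStepA; simp [hxh]
      rw [hsa]
      have hFx : x.2 ≤ (t.foldl pvStepA x).2 := pvM t x
      by_cases hhs : h.2 > s.1 <;>
        simp only [hhs, if_pos, if_false] <;>
        split_ifs <;> first | rfl | (exfalso; omega)
    · have hsa : pvStepA h x = h := by unfold pvStepA; simp [hxh]
      rw [hsa]
      have hNh := pvN t h x (by omega)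
      by_cases hFh : (t.foldl pvStepA x).2 > h.2
      · rw [if_pos hFh] at hNh
        rw [hNh]
        by_cases hhs : h.2 > s.1 <;>
          simp only [hhs, if_pos, if_false] <;>
          split_ifs <;> first | rfl | (exfalso; omega)
      · rw [if_neg hFh] at hNh
        rw [hNh]
        by_cases hhs : h.2 > s.1 <;>
          simp only [hhs, if_pos, if_false] <;>
          split_ifs <;> first | rfl | (exfalso; omega)

-- a fold that does not strictly increase the value never replaced the seed
theorem pvM' (t : List (String × Int)) (h : String × Int) :
    t.foldl pvStepA h = h ∨ (t.foldl pvStepA h).2 > h.2 := by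
  induction t generalizing h with
  | nil => exact Or.inl rfl
  | cons x t ih =>
    simp only [List.foldl_cons]
    by_cases hx : x.2 > h.2
    · have hsa : pvStepA h x = x := by unfold pvStepA; simp [hx]
      rw [hsa]
      exact Or.inr (by have := pvM t x; omega)
    · have hsa : pvStepA h x = h := by unfold pvStepA; simp [hx]
      rw [hsa]; exact ih h

-- B's fold over a label's entries from an empty best
theorem pvL0 (label : String) (t : List (String × Int)) (h : String × Int) :
    t.foldl (pvStepB label) (pvStepB label none h) =
      some ((t.foldl pvStepA h).2, label, (t.foldl pvStepA h).1) := by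
  have hs : pvStepB label none h = some (h.2, label, h.1) := rfl
  have he : pvStepB label (some (h.2, label, h.1)) h = some (h.2, label, h.1) := by
    unfold pvStepB; simp
  rw [hs, ← he, pvL]
  rcases pvM' t h with heq | hgt
  · rw [heq, if_neg (by omega)]
  · rw [if_pos (by simpa using hgt)]

-- per-label collapse: B's fold over one label equals one optStep with A's signal
theorem pvCollapse (label : String) (vals : List (String × Int))
    (b : Option (Int × String × String)) (h : String × Int) :
    (h :: vals).foldl (pvStepB label) b =
      pvOptStep b ((vals.foldl pvStepA h).2, label, (vals.foldl pvStepA h).1) := by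
  cases b with
  | none => simpa using pvL0 label vals h
  | some s =>
    simp only [List.foldl_cons]
    rw [pvL label vals h s]
    unfold pvOptStep
    by_cases hc : (vals.foldl pvStepA h).2 > s.1 <;> simp [hc]

-- fold of optStep over a list vs A's nonempty-match + stepOuter fold
theorem pvQsome (l : List (Int × String × String)) (s : Int × String × String) :
    l.foldl pvOptStep (some s) = some (l.foldl (fun b x => if x.1 > b.1 then x else b) s) := by
  induction l generalizing s with
  | nil => rfl
  | cons x l ih =>
    simp only [List.foldl_cons]
    have : pvOptStep (some s) x = some (if x.1 > s.1 then x else s) := by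
      unfold pvOptStep
      by_cases hc : x.1 > s.1 <;> simp [hc]
    rw [this, ih]

-- A's append-building fold is filterMap of the per-label signal
def pvSig? (lv : String × List (String × Int)) : Option (Int × String × String) :=
  match lv.2 with
  | [] => none
  | h :: t => some ((pvInnerMax h t).2, lv.1, (pvInnerMax h t).1)

theorem pvSignals (db : List (String × List (String × Int)))
    (acc : List (Int × String × String)) :
    db.foldl (fun acc lv =>
      match lv.2 with
      | [] => acc
      | h :: t => acc ++ [((pvInnerMax h t).2, lv.1, (pvInnerMax h t).1)]) acc =
    acc ++ db.filterMap pvSig? := by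
  induction db generalizing acc with
  | nil => simp
  | cons lv db ih =>
    simp only [List.foldl_cons]
    cases hlv : lv.2 with
    | nil => rw [ih]; simp [pvSig?, hlv]
    | cons h t => rw [ih]; simp [pvSig?, hlv]

-- B's fold over db equals the optStep fold over A's signals
theorem pvInnerMax_eq (h : String × Int) (t : List (String × Int)) :
    pvInnerMax h t = t.foldl pvStepA h := rfl

theorem pvMain (db : List (String × List (String × Int)))
    (b : Option (Int × String × String)) :
    db.foldl (fun b lv => lv.2.foldl (pvStepB lv.1) b) b =
      (db.filterMap pvSig?).foldl pvOptStep b := by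
  induction db generalizing b with
  | nil => rfl
  | cons lv db ih =>
    simp only [List.foldl_cons]
    cases hlv : lv.2 with
    | nil =>
      simp only [List.foldl_nil]
      rw [ih]
      simp [pvSig?, hlv]
    | cons h t =>
      rw [pvCollapse lv.1 t b h, ih]
      simp [pvSig?, hlv, pvInnerMax_eq]

-- ===== VERDICT (by name: the statement is the Claim_ definition above) =====
theorem top_demographic_signal_py_spec : Claim_equal_top_demographic_signal_py := by
  intro db _
  unfold Spec_top_demographic_signal_py
  unfold top_demographic_signal_py top_demographic_signal_py_alt
  simp only []
  rw [pvMain db none, pvSignals db []]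
  simp only [List.nil_append]
  cases hsig : db.filterMap pvSig? with
  | nil => rfl
  | cons s ss =>
    simp only [List.foldl_cons]
    have : pvOptStep none s = some s := rfl
    rw [this, pvQsome]
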